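-- pv_equiv track=rewrite | github.com/CEA-LIST/textmine-2025 | data/format_textmine_as_docred.py | get_token_positions
-- ===== SOURCE A (Python) =====
-- def get_token_positions(tokens):
--     """ Retourne les positions de départ et de fin des tokens dans le texte.
--         Accepte directement une liste de tokens au lieu de text brut.
--     """
--     position_mapping = []
--     current_start = 0
--
--     for token in tokens:
--         token_start = current_start
--         if len(token) == 1:
--             token_end = token_start
--         else:
--             token_end = token_start + len(token)
--
--         position_mapping.append((token_start, token_end))
--         current_start = token_end + 1  # Avancer après le token
--
--     return tokens, position_mapping
-- ===== SOURCE B (Python) =====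
-- def get_token_positions(tokens):
--     """Divide and conquer: compute each half's positions independently
--     (relative to 0), then shift the right half by the left half's total span."""
--     def solve(ts):
--         n = len(ts)
--         if n == 0:
--             return [], 0
--         if n == 1:
--             w = 0 if len(ts[0]) == 1 else len(ts[0])
--             return [(0, w)], w + 1
--         mid = n // 2
--         left, lspan = solve(ts[:mid])
--         right, rspan = solve(ts[mid:])
--         return left + [(a + lspan, b + lspan) for (a, b) in right], lspan + rspan
--
--     mapping, _ = solve(tokens)
--     return tokens, mapping
-- ===== Notes on version B (the rewrite author's own statement) =====
-- stated objective: alternative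
-- what changed: Replaces A's left-to-right cursor accumulation by a divide-and-conquer recursion: each half's positions are computed independently relative to 0 and the right half's pairs are shifted by the left half's total span when merged.
import Mathlib
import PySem

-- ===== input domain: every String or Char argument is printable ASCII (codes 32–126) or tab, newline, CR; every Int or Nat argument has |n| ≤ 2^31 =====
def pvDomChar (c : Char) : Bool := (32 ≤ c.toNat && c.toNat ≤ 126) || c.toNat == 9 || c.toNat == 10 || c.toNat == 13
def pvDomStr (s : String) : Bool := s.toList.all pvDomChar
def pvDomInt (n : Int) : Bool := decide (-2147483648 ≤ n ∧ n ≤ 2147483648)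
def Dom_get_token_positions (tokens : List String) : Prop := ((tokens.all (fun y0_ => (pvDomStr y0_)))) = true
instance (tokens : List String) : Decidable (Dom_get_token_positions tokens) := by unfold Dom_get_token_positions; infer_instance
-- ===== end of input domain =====

-- B replaces A's left-to-right cursor loop by a divide-and-conquer recursion
-- (halves computed relative to 0, right half shifted by the left half's span) — alternative decomposition.

-- ===== PORT A =====
def get_token_positions (tokens : List String) : List String × (List (Int × Int)) :=
  let res := tokens.foldl
    (fun (st : List (Int × Int) × Int) token =>
      let token_start := st.2
      let token_end := if PySem.Str.len token = 1 then token_start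
                       else token_start + PySem.Str.len token
      (st.1 ++ [(token_start, token_end)], token_end + 1))
    ([], 0)
  (tokens, res.1)

-- ===== PORT B =====
-- solve: positions of ts relative to 0, together with ts's total span.
def pvSolve : List String → List (Int × Int) × Int
  | [] => ([], 0)
  | [t] =>
      let w := if PySem.Str.len t = 1 then 0 else PySem.Str.len t
      ([(0, w)], w + 1)
  | t1 :: t2 :: ts =>
      let n := (t1 :: t2 :: ts).length
      let mid := n / 2
      let L := pvSolve ((t1 :: t2 :: ts).take mid)
      let R := pvSolve ((t1 :: t2 :: ts).drop mid)
      (L.1 ++ R.1.map (fun p => (p.1 + L.2, p.2 + L.2)), L.2 + R.2)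
  termination_by ts => ts.length
  decreasing_by
  · simp; omega
  · simp; omega

def get_token_positions_alt (tokens : List String) : List String × (List (Int × Int)) :=
  (tokens, (pvSolve tokens).1)

-- ===== PRECONDITION & SPEC =====
def Spec_get_token_positions (tokens : List String) (out : List String × (List (Int × Int))) : Prop := out = get_token_positions_alt tokens
instance (tokens : List String) (out : List String × (List (Int × Int))) : Decidable (Spec_get_token_positions tokens out) := by unfold Spec_get_token_positions; infer_instance

-- ===== CLAIM (what is proved, stated in full; the proofs are below) =====
def Claim_equal_get_token_positions : Prop := ∀ (tokens : List String), Dom_get_token_positions tokens → Spec_get_token_positions tokens (get_token_positions tokens)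

-- ===== LEMMAS AND PROOFS =====

/-- Reference recursion over the widths: the positions list, started at cursor `s`. -/
def pvGoW : List Int → Int → List (Int × Int)
  | [], _ => []
  | w :: ws, s => (s, s + w) :: pvGoW ws (s + w + 1)

/-- A's fold equals the reference recursion on the widths. -/
lemma pvA_foldl (tokens : List String) : ∀ (acc : List (Int × Int)) (s : Int),
    tokens.foldl
      (fun (st : List (Int × Int) × Int) token =>
        let token_start := st.2
        let token_end := if PySem.Str.len token = 1 then token_start
                         else token_start + PySem.Str.len token
        (st.1 ++ [(token_start, token_end)], token_end + 1))
      (acc, s)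
    = (acc ++ pvGoW (tokens.map (fun t => if PySem.Str.len t = 1 then 0 else PySem.Str.len t)) s,
        s + (tokens.map (fun t => if PySem.Str.len t = 1 then 0 else PySem.Str.len t)).sum
          + tokens.length) := by
  induction tokens with
  | nil => intro acc s; simp [pvGoW]
  | cons t ts ih =>
    intro acc s
    simp only [List.foldl_cons, List.map_cons, pvGoW, List.sum_cons, List.length_cons]
    have hend : (if PySem.Str.len t = 1 then s else s + PySem.Str.len t)
        = s + (if PySem.Str.len t = 1 then 0 else PySem.Str.len t) := by
      split_ifs <;> omega
    rw [hend, ih]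
    simp only [Prod.mk.injEq]
    constructor
    · simp
    · push_cast; ring

lemma pvGoW_shift (ws : List Int) : ∀ (s d : Int),
    pvGoW ws (s + d) = (pvGoW ws s).map (fun p => (p.1 + d, p.2 + d)) := by
  induction ws with
  | nil => intro s d; simp [pvGoW]
  | cons w ws ih =>
    intro s d
    simp only [pvGoW, List.map_cons]
    rw [show s + d + w + 1 = (s + w + 1) + d from by ring, ih]
    simp [add_right_comm]

lemma pvGoW_append (w1 w2 : List Int) : ∀ (s : Int),
    pvGoW (w1 ++ w2) s = pvGoW w1 s ++ pvGoW w2 (s + w1.sum + w1.length) := by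
  induction w1 with
  | nil => intro s; simp [pvGoW]
  | cons w ws ih =>
    intro s
    simp only [List.cons_append, pvGoW, ih, List.sum_cons, List.length_cons]
    congr 2
    all_goals congr 1; push_cast; ring

lemma pvGoW_shift0 (ws : List Int) (d : Int) :
    pvGoW ws d = (pvGoW ws 0).map (fun p => (p.1 + d, p.2 + d)) := by
  have h := pvGoW_shift ws 0 d
  simpa using h

/-- Widths of a token list. -/
def pvW (ts : List String) : List Int :=
  ts.map (fun t => if PySem.Str.len t = 1 then 0 else PySem.Str.len t)

lemma pvSolve_eq (ts : List String) :
    pvSolve ts = (pvGoW (pvW ts) 0, (pvW ts).sum + ts.length) := by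
  induction ts using pvSolve.induct with
  | case1 => simp [pvSolve, pvW, pvGoW]
  | case2 t => simp [pvSolve, pvW, pvGoW]
  | case3 t1 t2 ts n mid ih1 ih2 =>
    have hm : mid = (t1 :: t2 :: ts).length / 2 := rfl
    rw [hm] at ih1 ih2
    rw [pvSolve]
    rw [ih1, ih2]
    have hsplit : pvW (t1 :: t2 :: ts)
        = pvW ((t1 :: t2 :: ts).take ((t1 :: t2 :: ts).length / 2))
          ++ pvW ((t1 :: t2 :: ts).drop ((t1 :: t2 :: ts).length / 2)) := by
      simp only [pvW, ← List.map_append, List.take_append_drop]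
    rw [hsplit, pvGoW_append]
    simp only [Prod.mk.injEq]
    refine ⟨?_, ?_⟩
    · conv_rhs => rw [pvGoW_shift0 (pvW ((t1 :: t2 :: ts).drop ((t1 :: t2 :: ts).length / 2)))]
      simp [pvW]
    · rw [List.sum_append]
      have h12 : (((t1 :: t2 :: ts).take ((t1 :: t2 :: ts).length / 2)).length : Int)
          + (((t1 :: t2 :: ts).drop ((t1 :: t2 :: ts).length / 2)).length : Int)
          = ((t1 :: t2 :: ts).length : Int) := by
        simp; omega
      rw [← h12]
      ring

-- ===== VERDICT (by name: the statement is the Claim_ definition above) =====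
theorem get_token_positions_spec : Claim_equal_get_token_positions := by
  intro tokens _
  unfold Spec_get_token_positions get_token_positions get_token_positions_alt
  simp only
  rw [pvA_foldl tokens [] 0, pvSolve_eq]
  simp [pvW]
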